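-- pv_equiv track=rewrite | github.com/mazalkov/CodeSignal | Code Arcade/Intro/Level 2/matrixElementsSum.py | solution
-- ===== SOURCE A (Python) =====
-- def solution(matrix):
--
--     total = 0
--
--     # first row can't have 0s above
--     total += sum(matrix[0])
--
--     to_skip = set()
--
--     for i, row in enumerate(matrix[1:]):
--         for j, col in enumerate(row):
--             if matrix[i][j] == 0:
--                 to_skip.add(j)
--
--             else:
--                 if j not in to_skip:
--                     total += matrix[i+1][j]
--
--
--     return total
-- ===== SOURCE B (Python) =====
-- def solution(matrix):
--     # Column-major scan: walk each column top-to-bottom, stop at the first zero.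
--     def col_sum(rows, j):
--         total = 0
--         for row in rows:
--             if row[j] == 0:
--                 break
--             total += row[j]
--         return total
--
--     return sum(col_sum(matrix, j) for j in range(len(matrix[0])))
-- ===== Notes on version B (the rewrite author's own statement) =====
-- stated objective: simpler
-- what changed: Replaces A's row-major scan with an enumerate index bookkeeping set to_skip by a direct column-major scan that sums each column top-to-bottom and breaks at the first zero.
-- outside the precondition, e.g. on solution([[1, 2], [3]]): A returns 6, B raises IndexError
import Mathlib
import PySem

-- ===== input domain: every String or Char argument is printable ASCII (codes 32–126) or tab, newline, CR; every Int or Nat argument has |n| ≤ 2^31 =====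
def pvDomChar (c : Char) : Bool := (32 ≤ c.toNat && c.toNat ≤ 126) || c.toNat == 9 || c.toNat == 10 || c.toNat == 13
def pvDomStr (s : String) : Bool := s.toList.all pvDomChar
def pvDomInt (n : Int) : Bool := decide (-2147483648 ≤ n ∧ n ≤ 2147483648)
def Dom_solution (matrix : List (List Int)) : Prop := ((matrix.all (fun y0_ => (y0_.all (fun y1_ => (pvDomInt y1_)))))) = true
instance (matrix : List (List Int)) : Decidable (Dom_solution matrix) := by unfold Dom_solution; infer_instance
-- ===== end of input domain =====

-- B replaces A's row-major scan with a to_skip set by a column-major scan with an early break (objective: simpler).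

-- ===== PORT A =====
-- '.getD []' / '.getD 0' turns pyGet?'s none (Python IndexError) into junk; Pre_solution excludes those inputs.
def solution (matrix : List (List Int)) : Int :=
  let total : Int := 0 + ((PySem.List.pyGet? matrix 0).getD []).sum   -- total = 0; total += sum(matrix[0])
  let st : Int × PySem.Set Int :=
    (PySem.List.enumerate (PySem.List.slice matrix (some 1) none)).foldl
      (fun st p =>
        let i := p.1
        let row := p.2
        (PySem.List.enumerate row).foldl
          (fun st q =>
            let j := q.1
            if (PySem.List.pyGet? ((PySem.List.pyGet? matrix i).getD []) j).getD 0 == 0 then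
              (st.1, PySem.Set.add st.2 j)
            else if ¬ PySem.Set.contains st.2 j then
              (st.1 + (PySem.List.pyGet? ((PySem.List.pyGet? matrix (i + 1)).getD []) j).getD 0, st.2)
            else st)
          st)
      (total, PySem.Set.empty)
  st.1

-- ===== PORT B =====
-- col_sum(rows, j): walk down the rows, break at the first zero ('.getD 0' = Python IndexError, excluded by Pre_).
def colSum : List (List Int) → Int → Int
  | [], _ => 0
  | r :: rs, j =>
    let v := (PySem.List.pyGet? r j).getD 0
    if v == 0 then 0 else v + colSum rs j

def solution_alt (matrix : List (List Int)) : Int :=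
  (PySem.List.pyRange 0 (((PySem.List.pyGet? matrix 0).getD []).length : Int)).foldl
    (fun acc j => acc + colSum matrix j) 0

-- ===== PRECONDITION & SPEC =====
-- Pre_ excludes the empty matrix (A raises IndexError on matrix[0]) and jagged matrices: on a row longer
-- than its predecessor A raises IndexError, and on the remaining jagged shapes (non-increasing row lengths)
-- A still returns a value but B's column walk raises IndexError there (see claim cites).
def Pre_solution (matrix : List (List Int)) : Prop :=
  matrix ≠ [] ∧ ∀ r ∈ matrix, r.length = (matrix.headD []).length
instance (matrix : List (List Int)) : Decidable (Pre_solution matrix) := by unfold Pre_solution; infer_instance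

def pvWitness_solution : List (List Int) := [[1, 2, 3], [0, 5, 6], [7, 8, 9]]

def Spec_solution (matrix : List (List Int)) (out : Int) : Prop := out = solution_alt matrix
instance (matrix : List (List Int)) (out : Int) : Decidable (Spec_solution matrix out) := by unfold Spec_solution; infer_instance

-- ===== CLAIM (what is proved, stated in full; the proofs are below) =====
def Claim_equal_solution : Prop := ∀ (matrix : List (List Int)), Dom_solution matrix → Pre_solution matrix → Spec_solution matrix (solution matrix)

-- ===== LEMMAS AND PROOFS =====
def entry (r : List Int) (j : Int) : Int := (PySem.List.pyGet? r j).getD 0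

lemma innerA (prev cur : List Int)
    (F : (Int × PySem.Set Int) → (Int × Int) → (Int × PySem.Set Int))
    (hF : ∀ st (q : Int × Int), F st q =
      (if entry prev q.1 = 0 then (st.1, PySem.Set.add st.2 q.1)
       else if q.1 ∈ st.2 then st
       else (st.1 + entry cur q.1, st.2))) :
    ∀ (row : List Int) (s : Int) (t : Int) (S : PySem.Set Int),
      (((PySem.List.enumerate row s).foldl F (t, S)).1
        = t + ((PySem.List.pyRange s (s + (row.length : Int))).map
            (fun j => if entry prev j = 0 ∨ j ∈ S then 0 else entry cur j)).sum)
      ∧ (∀ x : Int, x ∈ ((PySem.List.enumerate row s).foldl F (t, S)).2 ↔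
          x ∈ S ∨ (x ∈ PySem.List.pyRange s (s + (row.length : Int)) ∧ entry prev x = 0)) := by
  intro row
  induction row with
  | nil =>
      intro s t S
      constructor
      · simp [PySem.List.enumerate]
      · intro x
        simp [PySem.List.enumerate]
  | cons c row ih =>
      intro s t S
      rw [PySem.List.enumerate_cons]
      have hcons : PySem.List.pyRange s (s + ((c :: row).length : Int))
          = s :: PySem.List.pyRange (s + 1) (s + ((c :: row).length : Int)) :=
        PySem.List.pyRange_one_cons (by simp)
      have hre : (s : Int) + ((c :: row).length : Int) = (s + 1) + (row.length : Int) := by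
        simp; omega
      simp only [List.foldl_cons, hF]
      by_cases hz : entry prev s = 0
      · rw [if_pos hz]
        obtain ⟨ih1, ih2⟩ := ih (s + 1) t (PySem.Set.add S s)
        constructor
        · rw [ih1, hcons, hre, List.map_cons, List.sum_cons, if_pos (Or.inl hz), zero_add]
          congr 1
          apply congrArg List.sum
          apply List.map_congr_left
          intro j hj
          have hjs : s + 1 ≤ j := (PySem.List.mem_pyRange_one.mp hj).1
          have hne : j ≠ s := by omega
          have : (j ∈ PySem.Set.add S s) ↔ j ∈ S := by
            rw [PySem.Set.mem_add]
            simp [hne]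
          simp [this]
        · intro x
          rw [ih2 x, hcons, hre]
          rw [PySem.Set.mem_add]
          simp only [List.mem_cons]
          by_cases hxs : x = s
          · subst hxs; simp [hz]
          · simp [hxs]
      · rw [if_neg hz]
        by_cases hc : s ∈ S
        · rw [if_pos hc]
          obtain ⟨ih1, ih2⟩ := ih (s + 1) t S
          constructor
          · rw [ih1, hcons, hre, List.map_cons, List.sum_cons, if_pos (Or.inr hc), zero_add]
          · intro x
            rw [ih2 x, hcons, hre]
            simp only [List.mem_cons]
            by_cases hxs : x = s
            · subst hxs; simp [hz, hc]
            · simp [hxs]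
        · rw [if_neg hc]
          obtain ⟨ih1, ih2⟩ := ih (s + 1) (t + entry cur s) S
          constructor
          · rw [ih1, hcons, hre, List.map_cons, List.sum_cons,
              if_neg (by rintro (h | h); exacts [hz h, hc h])]
            ring
          · intro x
            rw [ih2 x, hcons, hre]
            simp only [List.mem_cons]
            by_cases hxs : x = s
            · subst hxs; simp [hz]
            · simp [hxs]

def col (rows : List (List Int)) (j : Int) : List Int := rows.map (fun r => entry r j)

def g : List Int → Int
  | [] => 0
  | v :: vs => if v = 0 then 0 else v + g vs

lemma outerA (matrix : List (List Int)) (W : Nat)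
    (hrect : ∀ r ∈ matrix, r.length = W)
    (G : (Int × PySem.Set Int) → (Int × List Int) → (Int × PySem.Set Int))
    (hG : ∀ st (p : Int × List Int), G st p =
      (PySem.List.enumerate p.2).foldl
        (fun st q =>
          if entry ((PySem.List.pyGet? matrix p.1).getD []) q.1 = 0 then
            (st.1, PySem.Set.add st.2 q.1)
          else if q.1 ∈ st.2 then st
          else (st.1 + entry ((PySem.List.pyGet? matrix (p.1 + 1)).getD []) q.1, st.2))
        st) :
    ∀ (rows : List (List Int)) (k : Nat) (t : Int) (S : PySem.Set Int),
      rows = matrix.drop (k + 1) →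
      (∀ x : Int, x ∈ S ↔ x ∈ PySem.List.pyRange 0 (W : Int) ∧
          ∃ r ∈ matrix.take k, entry r x = 0) →
      ((PySem.List.enumerate rows (k : Int)).foldl G (t, S)).1
        = t + ((PySem.List.pyRange 0 (W : Int)).map
            (fun j => if (∀ r ∈ matrix.take (k + 1), entry r j ≠ 0)
                      then g (col (matrix.drop (k + 1)) j) else 0)).sum := by
  intro rows
  induction rows with
  | nil =>
      intro k t S h hS
      have hdrop : matrix.drop (k + 1) = [] := h.symm
      simp [PySem.List.enumerate, hdrop, col, g]
  | cons row rows' ih =>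
      intro k t S h hS
      -- basic facts
      have hk1 : matrix[k + 1]? = some row := by
        have := List.getElem?_drop (xs := matrix) (i := k + 1) (j := 0)
        rw [← h] at this; simpa using this.symm
      have hk1lt : k + 1 < matrix.length := by
        exact (List.getElem?_eq_some_iff.mp hk1).1
      have hklt : k < matrix.length := by omega
      have hdrop' : rows' = matrix.drop (k + 2) := by
        have : (matrix.drop (k + 1)).tail = matrix.drop (k + 1 + 1) := by
          rw [List.tail_drop]
        rw [← h] at this; simpa using this
      have hprev : (PySem.List.pyGet? matrix (k : Int)).getD [] = matrix[k] := by
        rw [PySem.List.pyGet?_natCast, List.getElem?_eq_getElem hklt]; rfl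
      have hcur : (PySem.List.pyGet? matrix ((k : Int) + 1)).getD [] = row := by
        have : ((k : Int) + 1) = ((k + 1 : Nat) : Int) := by push_cast; ring
        rw [this, PySem.List.pyGet?_natCast, hk1]; rfl
      have hrowmem : row ∈ matrix := by
        exact List.mem_of_getElem? hk1
      have hrowlen : row.length = W := hrect row hrowmem
      -- unfold one step of the outer fold
      rw [PySem.List.enumerate_cons, List.foldl_cons, hG]
      -- the inner fold via innerA
      have hinner := innerA ((PySem.List.pyGet? matrix (k : Int)).getD [])
        ((PySem.List.pyGet? matrix ((k : Int) + 1)).getD [])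
        (fun st q =>
          if entry ((PySem.List.pyGet? matrix (k : Int)).getD []) q.1 = 0 then
            (st.1, PySem.Set.add st.2 q.1)
          else if q.1 ∈ st.2 then st
          else (st.1 + entry ((PySem.List.pyGet? matrix ((k : Int) + 1)).getD []) q.1, st.2))
        (fun st q => rfl) row 0 t S
      obtain ⟨hin1, hin2⟩ := hinner
      set st' := (PySem.List.enumerate row 0).foldl
        (fun st (q : Int × Int) =>
          if entry ((PySem.List.pyGet? matrix (k : Int)).getD []) q.1 = 0 then
            (st.1, PySem.Set.add st.2 q.1)
          else if q.1 ∈ st.2 then st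
          else (st.1 + entry ((PySem.List.pyGet? matrix ((k : Int) + 1)).getD []) q.1, st.2))
        (t, S) with hst'
      -- new set characterization
      have hS' : ∀ x : Int, x ∈ st'.2 ↔ x ∈ PySem.List.pyRange 0 (W : Int) ∧
          ∃ r ∈ matrix.take (k + 1), entry r x = 0 := by
        intro x
        rw [hin2 x]
        rw [List.take_add_one]
        have hgk : matrix[k]? = some matrix[k] := List.getElem?_eq_getElem hklt
        simp only [hgk, Option.toList_some, hprev, hrowlen, zero_add, hS x]
        constructor
        · rintro (⟨hr, r, hm, hz⟩ | ⟨hr, hz⟩)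
          · exact ⟨hr, r, List.mem_append_left _ hm, hz⟩
          · exact ⟨hr, matrix[k], List.mem_append_right _ (by simp), hz⟩
        · rintro ⟨hr, r, hm, hz⟩
          rcases List.mem_append.mp hm with hm | hm
          · exact Or.inl ⟨hr, r, hm, hz⟩
          · simp at hm; subst hm; exact Or.inr ⟨hr, hz⟩
      -- apply ih at k+1
      have hk1cast : ((k : Int) + 1) = ((k + 1 : Nat) : Int) := by push_cast; ring
      have hihres := ih (k + 1) st'.1 st'.2 (by simpa using hdrop') hS'
      rw [hk1cast]
      rw [hihres]
      -- now combine sums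
      rw [hin1]
      simp only [hprev, hcur, hrowlen, zero_add]
      rw [add_assoc]
      congr 1
      rw [← PySem.List.sum_map_add_int]
      apply congrArg List.sum
      apply List.map_congr_left
      intro j hj
      -- per-column identity
      have htake2 : matrix.take (k + 1 + 1) = matrix.take (k + 1) ++ [row] := by
        rw [List.take_add_one]
        simp [hk1]
      have htake1 : matrix.take (k + 1) = matrix.take k ++ [matrix[k]] := by
        rw [List.take_add_one]
        simp [List.getElem?_eq_getElem hklt]
      have hcolcons : col (matrix.drop (k + 1)) j = entry row j :: col (matrix.drop (k + 2)) j := by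
        rw [← h, hdrop']
        rfl
      have halive1 : (∀ r ∈ matrix.take (k + 1), entry r j ≠ 0)
          ↔ ¬(entry matrix[k] j = 0 ∨ j ∈ S) := by
        rw [htake1, hS j]
        constructor
        · intro hall
          rintro (hz | ⟨hr, r, hm, hz⟩)
          · exact hall matrix[k] (List.mem_append_right _ (by simp)) hz
          · exact hall r (List.mem_append_left _ hm) hz
        · intro hn r hm hz
          rcases List.mem_append.mp hm with hm | hm
          · exact hn (Or.inr ⟨hj, r, hm, hz⟩)
          · simp at hm; subst hm; exact hn (Or.inl hz)
      have halive2 : (∀ r ∈ matrix.take (k + 1 + 1), entry r j ≠ 0)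
          ↔ ((∀ r ∈ matrix.take (k + 1), entry r j ≠ 0) ∧ entry row j ≠ 0) := by
        rw [htake2]
        constructor
        · intro hall
          exact ⟨fun r hm => hall r (List.mem_append_left _ hm),
                 hall row (List.mem_append_right _ (by simp))⟩
        · rintro ⟨h1, h2⟩ r hm
          rcases List.mem_append.mp hm with hm | hm
          · exact h1 r hm
          · simp at hm; subst hm; exact h2
      rw [hcolcons]
      by_cases ha : ∀ r ∈ matrix.take (k + 1), entry r j ≠ 0
      · rw [if_neg (halive1.mp ha)]
        by_cases hz : entry row j = 0
        · rw [if_neg (by rw [halive2]; rintro ⟨_, hzz⟩; exact hzz hz),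
             if_pos ha]
          simp [g, hz]
        · rw [if_pos (halive2.mpr ⟨ha, hz⟩), if_pos ha]
          simp [g, hz]
      · rw [if_pos (by rw [halive1] at ha; tauto),
           if_neg (by rw [halive2]; rintro ⟨h1, _⟩; exact ha h1),
           if_neg ha]
        simp

lemma colSum_eq_g (rows : List (List Int)) (j : Int) : colSum rows j = g (col rows j) := by
  induction rows with
  | nil => rfl
  | cons r rs ih =>
      simp only [colSum, col, g, List.map, entry] at *
      split_ifs with h h' h'
      · rfl
      · simp [beq_iff_eq] at h; exact absurd h h'
      · simp [beq_iff_eq] at h; exact absurd h' h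
      · rw [ih]

lemma solution_alt_eq (matrix : List (List Int)) :
    solution_alt matrix
      = ((PySem.List.pyRange 0 (((PySem.List.pyGet? matrix 0).getD []).length : Int)).map
          (fun j => g (col matrix j))).sum := by
  unfold solution_alt
  rw [PySem.List.foldl_add]
  rw [zero_add]
  exact congrArg List.sum (List.map_congr_left (fun j _ => colSum_eq_g matrix j))

theorem main (matrix : List (List Int))
    (hne : matrix ≠ [])
    (hrect0 : ∀ r ∈ matrix, r.length = (matrix.headD []).length) :
    solution matrix = solution_alt matrix := by
  obtain ⟨r0, rest, rfl⟩ : ∃ r0 rest, matrix = r0 :: rest := by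
    cases matrix with
    | nil => exact absurd rfl hne
    | cons a l => exact ⟨a, l, rfl⟩
  set matrix := r0 :: rest with hmat
  have hrect : ∀ r ∈ matrix, r.length = r0.length := by
    intro r hr; simpa using hrect0 r hr
  -- the port's outer-loop body, named
  have hbody : ∀ (i : Int) (st : Int × PySem.Set Int) (q : Int × Int),
      (if (PySem.List.pyGet? ((PySem.List.pyGet? matrix i).getD []) q.1).getD 0 == 0 then
         (st.1, PySem.Set.add st.2 q.1)
       else if ¬ PySem.Set.contains st.2 q.1 then
         (st.1 + (PySem.List.pyGet? ((PySem.List.pyGet? matrix (i + 1)).getD []) q.1).getD 0, st.2)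
       else st)
      = (if entry ((PySem.List.pyGet? matrix i).getD []) q.1 = 0 then
           (st.1, PySem.Set.add st.2 q.1)
         else if q.1 ∈ st.2 then st
         else (st.1 + entry ((PySem.List.pyGet? matrix (i + 1)).getD []) q.1, st.2)) := by
    intro i st q
    simp only [entry, beq_iff_eq]
    by_cases hz : (PySem.List.pyGet? ((PySem.List.pyGet? matrix i).getD []) q.1).getD 0 = 0
    · simp [hz]
    · by_cases hm : q.1 ∈ st.2
      · simp [hz, hm, PySem.Set.contains]
      · simp [hz, hm, PySem.Set.contains]
  have h1 : solution matrix
      = ((PySem.List.enumerate rest ((0 : Nat) : Int)).foldl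
          (fun st (p : Int × List Int) =>
            (PySem.List.enumerate p.2).foldl
              (fun st (q : Int × Int) =>
                if (PySem.List.pyGet? ((PySem.List.pyGet? matrix p.1).getD []) q.1).getD 0 == 0 then
                  (st.1, PySem.Set.add st.2 q.1)
                else if ¬ PySem.Set.contains st.2 q.1 then
                  (st.1 + (PySem.List.pyGet? ((PySem.List.pyGet? matrix (p.1 + 1)).getD []) q.1).getD 0, st.2)
                else st)
              st)
          (0 + r0.sum, PySem.Set.empty)).1 := by
    simp only [solution, hmat, PySem.List.pyGet?_zero_cons, Option.getD_some,
      PySem.List.slice_from_one, List.tail_cons, Nat.cast_zero]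
  rw [h1]
  have houter := outerA matrix r0.length hrect _
    (fun st p => PySem.List.foldl_congr_mem _ _ _ st (fun acc x _ => hbody p.1 acc x))
    rest 0 (0 + r0.sum) PySem.Set.empty (by simp [hmat])
    (by intro x; simp [PySem.Set.empty])
  rw [houter]
  -- right-hand side
  rw [solution_alt_eq]
  simp only [hmat, PySem.List.pyGet?_zero_cons, Option.getD_some]
  have hsum : r0.sum = ((PySem.List.pyRange 0 (r0.length : Int)).map (fun j => entry r0 j)).sum := by
    conv_lhs => rw [← PySem.List.map_pyGetD_pyRange_zero r0 0]
    rfl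
  rw [zero_add, hsum, ← PySem.List.sum_map_add_int]
  apply congrArg List.sum
  apply List.map_congr_left
  intro j hj
  have : matrix.take (0 + 1) = [r0] := by simp [hmat]
  rw [this]
  have : matrix.drop (0 + 1) = rest := by simp [hmat]
  rw [this]
  have hcol : col matrix j = entry r0 j :: col rest j := rfl
  rw [hcol]
  by_cases hz : entry r0 j = 0
  · simp [g, hz]
  · simp [g, hz]

-- ===== VERDICT (by name: the statement is the Claim_ definition above) =====
theorem solution_spec : Claim_equal_solution := by
  intro matrix _ hpre
  exact main matrix hpre.1 hpre.2
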